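-- pv_equiv track=rewrite | github.com/BiznetGIO/nvc-lite | nvc-api/app/libs/utils.py | parse_opestack_admin
-- ===== SOURCE A (Python) =====
-- def parse_opestack_admin(parse, region):
--     openstack_data = parse.split(",")
--     op_data_fix = dict()
--     for k in openstack_data:
--         data_env_split_equal = k.split("=")
--         dt_region = data_env_split_equal[0].replace('"','')
--         admin_domain_data = data_env_split_equal[1].replace('"','')
--         if dt_region == region:
--             op_data_fix = {
--                 dt_region: admin_domain_data
--             }
--     return op_data_fix
-- ===== SOURCE B (Python) =====
-- def parse_opestack_admin(parse, region):
--     # Stage 1: parse every entry into a (key, value) pair.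
--     pairs = []
--     for entry in parse.split(","):
--         parts = entry.split("=")
--         pairs.append((parts[0].replace('"', ''), parts[1].replace('"', '')))
--     # Stage 2: last-wins lookup = first match scanning the parsed pairs back-to-front.
--     for key, value in reversed(pairs):
--         if key == region:
--             return {region: value}
--     return dict()
-- ===== Notes on version B (the rewrite author's own statement) =====
-- stated objective: alternative
-- what changed: B splits the job into two stages: it first parses all entries into a list of (key,value) pairs, then exploits last-wins semantics by scanning that list back-to-front and returning at the first matching key, instead of A's single forward pass that keeps overwriting a one-entry dict.
import Mathlib
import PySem

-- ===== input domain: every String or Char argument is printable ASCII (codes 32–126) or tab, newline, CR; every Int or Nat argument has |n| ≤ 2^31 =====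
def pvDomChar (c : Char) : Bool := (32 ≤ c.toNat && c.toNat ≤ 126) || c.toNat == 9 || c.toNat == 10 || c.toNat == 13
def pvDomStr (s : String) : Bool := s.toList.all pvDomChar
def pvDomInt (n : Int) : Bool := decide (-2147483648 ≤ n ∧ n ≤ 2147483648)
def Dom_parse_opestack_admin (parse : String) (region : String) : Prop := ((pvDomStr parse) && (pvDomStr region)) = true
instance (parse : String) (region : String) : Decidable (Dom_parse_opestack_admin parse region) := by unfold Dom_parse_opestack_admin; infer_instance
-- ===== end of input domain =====

-- B scans the entries in reverse and returns at the first matching key (last-wins), instead of A's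
-- full forward scan with an overwritten one-entry accumulator; same return value, no speed claim.

-- ===== PORT A =====
def parse_opestack_admin (parse : String) (region : String) : List (String × String) :=
  let openstack_data := (PySem.Str.split? parse ",").getD []
  openstack_data.foldl (fun op_data_fix k =>
    let data_env_split_equal := (PySem.Str.split? k "=").getD []
    let dt_region := PySem.Str.replace ((PySem.List.pyGet? data_env_split_equal 0).getD "") "\"" ""
    -- Python indexes [1] and raises IndexError when absent; those inputs are outside Pre_ (getD "" unreachable inside Pre_)
    let admin_domain_data := PySem.Str.replace ((PySem.List.pyGet? data_env_split_equal 1).getD "") "\"" ""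
    if dt_region == region then [(dt_region, admin_domain_data)] else op_data_fix) []

-- ===== PORT B =====
-- stage 2's reversed for-loop with early return, as structural recursion on the reversed pair list
def pvFind (region : String) : List (String × String) → List (String × String)
  | [] => []
  | (key, value) :: rest =>
    if key == region then [(region, value)] else pvFind region rest

def parse_opestack_admin_alt (parse : String) (region : String) : List (String × String) :=
  let pairs := ((PySem.Str.split? parse ",").getD []).map (fun entry =>
    let parts := (PySem.Str.split? entry "=").getD []
    (PySem.Str.replace ((PySem.List.pyGet? parts 0).getD "") "\"" "",
     PySem.Str.replace ((PySem.List.pyGet? parts 1).getD "") "\"" ""))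
  pvFind region pairs.reverse

-- ===== PRECONDITION & SPEC =====
-- Pre_ excludes exactly the inputs where some comma-separated entry has no '=': there Python A
-- raises IndexError on data_env_split_equal[1].
def Pre_parse_opestack_admin (parse : String) (region : String) : Prop :=
  ((PySem.Str.split? parse ",").getD []).all
    (fun k => 2 ≤ ((PySem.Str.split? k "=").getD []).length) = true
instance (parse : String) (region : String) : Decidable (Pre_parse_opestack_admin parse region) := by
  unfold Pre_parse_opestack_admin; infer_instance
def pvWitness_parse_opestack_admin : String × String := ("RegionOne=\"admin\",b=2", "RegionOne")
def Spec_parse_opestack_admin (parse : String) (region : String) (out : List (String × String)) : Prop := out = parse_opestack_admin_alt parse region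
instance (parse : String) (region : String) (out : List (String × String)) : Decidable (Spec_parse_opestack_admin parse region out) := by unfold Spec_parse_opestack_admin; infer_instance

-- ===== CLAIM (what is proved, stated in full; the proofs are below) =====
def Claim_equal_parse_opestack_admin : Prop := ∀ (parse : String) (region : String), Dom_parse_opestack_admin parse region → Pre_parse_opestack_admin parse region → Spec_parse_opestack_admin parse region (parse_opestack_admin parse region)

-- ===== LEMMAS AND PROOFS =====

-- first match on an appended list = first match on the left part, else on the right part
theorem pvFind_append (region : String) (xs ys : List (String × String)) :
    pvFind region (xs ++ ys)
      = (if pvFind region xs = [] then pvFind region ys else pvFind region xs) := by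
  induction xs with
  | nil => simp [pvFind]
  | cons p rest ih =>
    obtain ⟨k, v⟩ := p
    simp only [List.cons_append, pvFind]
    split_ifs with h h2 h3 <;> simp_all

-- A's forward fold from accumulator acc = first match on the reversed parsed list, defaulting to acc
theorem pv_fold_eq (region : String) (l : List String) (acc : List (String × String)) :
    l.foldl (fun op_data_fix k =>
      let parts := (PySem.Str.split? k "=").getD []
      let dt := PySem.Str.replace ((PySem.List.pyGet? parts 0).getD "") "\"" ""
      let ad := PySem.Str.replace ((PySem.List.pyGet? parts 1).getD "") "\"" ""
      if dt == region then [(dt, ad)] else op_data_fix) acc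
    = (let pairs := l.map (fun entry =>
        let parts := (PySem.Str.split? entry "=").getD []
        (PySem.Str.replace ((PySem.List.pyGet? parts 0).getD "") "\"" "",
         PySem.Str.replace ((PySem.List.pyGet? parts 1).getD "") "\"" ""))
       if pvFind region pairs.reverse = [] then acc else pvFind region pairs.reverse) := by
  induction l generalizing acc with
  | nil => simp [pvFind]
  | cons k rest ih =>
    simp only [List.foldl_cons, List.map_cons, List.reverse_cons, pvFind_append, ih]
    by_cases hr : pvFind region ((rest.map (fun entry =>
        let parts := (PySem.Str.split? entry "=").getD []
        (PySem.Str.replace ((PySem.List.pyGet? parts 0).getD "") "\"" "",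
         PySem.Str.replace ((PySem.List.pyGet? parts 1).getD "") "\"" ""))).reverse) = []
    · simp only [hr, if_true]
      by_cases h : (PySem.Str.replace ((PySem.List.pyGet? ((PySem.Str.split? k "=").getD []) 0).getD "") "\"" "" == region) = true
      · have hr2 : PySem.Str.replace ((PySem.List.pyGet? ((PySem.Str.split? k "=").getD []) 0).getD "") "\"" "" = region := by
          simpa using h
        simp [pvFind, h, hr2]
      · have hb : (PySem.Str.replace ((PySem.List.pyGet? ((PySem.Str.split? k "=").getD []) 0).getD "") "\"" "" == region) = false := by
          simpa using h
        simp [pvFind, hb]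
    · simp [hr]

-- ===== VERDICT (by name: the statement is the Claim_ definition above) =====
theorem parse_opestack_admin_spec : Claim_equal_parse_opestack_admin := by
  intro parse region _ _
  unfold Spec_parse_opestack_admin parse_opestack_admin parse_opestack_admin_alt
  simp only [pv_fold_eq]
  split_ifs with h
  · exact h.symm
  · rfl
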